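-- pv_equiv track=rewrite | github.com/vtkhang/novelutils-public | novelutils/utils/file.py | fix_bad_indent
-- ===== SOURCE A (Python) =====
-- import unicodedata as ud
--
-- def fix_bad_indent(data_in: tuple) -> tuple:
--     """Remove empty lines, bad indentation,...
--
--     Args:
--       data_in: list of lines
--
--     Returns:
--         tuple: cleaned text lines
--     """
--     temp = []
--     # filter the '' out of data_in and store to temp
--     for x in data_in:
--         if x != "":
--             temp.append(x.replace("\n", " "))
--     # Fix the content when it was composed by Notepad
--     temp2 = [temp[0]]
--     pa = ",:"
--     for x in range(1, len(temp)):
--         t2 = ud.category(temp[x][0])[1]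
--         if (temp2[-1][-1] in pa) or (t2 == "l"):
--             temp2[-1] += " " + temp[x]
--         else:
--             temp2.append(temp[x])
--     return tuple(temp2)
-- ===== SOURCE B (Python) =====
-- import unicodedata as ud
--
--
-- def fix_bad_indent(data_in: tuple) -> tuple:
--     """Remove empty lines, bad indentation,... (groups built back-to-front)."""
--     temp = [x.replace("\n", " ") for x in data_in if x != ""]
--     groups = [temp[-1]]
--     for prev, cur in reversed(list(zip(temp, temp[1:]))):
--         if prev[-1] in ",:" or ud.category(cur[0])[1] == "l":
--             groups[0] = prev + " " + groups[0]
--         else: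
--             groups.insert(0, prev)
--     return tuple(groups)
-- ===== Notes on version B (the rewrite author's own statement) =====
-- stated objective: alternative
-- what changed: B builds the result back-to-front: one right-to-left pass over the reversed zip of adjacent raw lines, prepending a new group or extending the FIRST group, instead of A's left-to-right accumulator that appends to the LAST group; the merge test reads the previous raw line instead of the accumulated string.
import Mathlib
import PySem

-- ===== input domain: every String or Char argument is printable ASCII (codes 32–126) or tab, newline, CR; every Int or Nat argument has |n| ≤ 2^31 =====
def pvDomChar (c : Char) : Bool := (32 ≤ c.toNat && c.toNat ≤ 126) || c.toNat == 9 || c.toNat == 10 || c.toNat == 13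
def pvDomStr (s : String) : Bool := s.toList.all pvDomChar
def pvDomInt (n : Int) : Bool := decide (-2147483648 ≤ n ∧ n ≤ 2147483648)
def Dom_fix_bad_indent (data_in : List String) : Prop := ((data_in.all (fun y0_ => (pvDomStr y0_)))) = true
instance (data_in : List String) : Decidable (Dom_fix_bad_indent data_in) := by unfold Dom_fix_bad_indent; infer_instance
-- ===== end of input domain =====

-- B builds the groups back-to-front in one right-to-left pass over adjacent raw-line pairs,
-- prepending to the group list, instead of A's left-to-right accumulation onto the last group
-- (a genuinely different traversal of the same cost; objective: alternative).

-- ===== PORT A =====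
-- shared helper: `s[-1] in ",:"` (false on the empty string, which Python would raise on;
-- under Pre_ the string is never empty at the call sites)
def pvLastIsPa (s : String) : Bool :=
  match s.toList.getLast? with
  | some c => c == ',' || c == ':'
  | none => false

-- shared helper: `ud.category(s[0])[1] == "l"` — on Dom (printable ASCII + tab/NL/CR) the
-- category's second letter is 'l' exactly for the lowercase letters a–z, so this is exact there
def pvFirstIsLower (s : String) : Bool :=
  match s.toList.head? with
  | some c => 'a' ≤ c && c ≤ 'z'
  | none => false

-- the `for x in range(1, len(temp))` loop of A: state is temp2 = done ++ [cur]
def fixBadIndentLoopA (cur : String) (done : List String) : List String → List String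
  | [] => done ++ [cur]
  | x :: xs =>
      if pvLastIsPa cur || pvFirstIsLower x then
        fixBadIndentLoopA (cur ++ " " ++ x) done xs
      else
        fixBadIndentLoopA x (done ++ [cur]) xs

def fix_bad_indent (data_in : List String) : List String :=
  let temp := data_in.foldl
    (fun acc x => if x ≠ "" then acc ++ [PySem.Str.replace x "\n" " "] else acc) []
  match temp with
  | [] => []                 -- Python raises IndexError at temp[0]; excluded by Pre_
  | h :: t => fixBadIndentLoopA h [] t

-- ===== PORT B =====
-- Source B's loop body: `groups[0] = prev + " " + groups[0]` or `groups.insert(0, prev)`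
def fixBadIndentStepB (groups : List String) (pc : String × String) : List String :=
  if pvLastIsPa pc.1 || pvFirstIsLower pc.2 then
    (pc.1 ++ " " ++ (groups.head?.getD "")) :: groups.drop 1
  else
    pc.1 :: groups

def fix_bad_indent_alt (data_in : List String) : List String :=
  let temp := (data_in.filter (fun x => x ≠ "")).map (fun x => PySem.Str.replace x "\n" " ")
  match temp.getLast? with                       -- temp[-1]
  | none => []               -- Python raises IndexError at temp[-1]; excluded by Pre_
  | some last =>
      -- `for prev, cur in reversed(list(zip(temp, temp[1:])))`
      ((temp.zip (temp.drop 1)).reverse).foldl fixBadIndentStepB [last]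

-- ===== PRECONDITION & SPEC =====
-- Pre_ excludes exactly the inputs with no nonempty line: there Python A (and B) raise IndexError.
def Pre_fix_bad_indent (data_in : List String) : Prop := ∃ x ∈ data_in, x ≠ ""
instance (data_in : List String) : Decidable (Pre_fix_bad_indent data_in) := by
  unfold Pre_fix_bad_indent; infer_instance

def pvWitness_fix_bad_indent : List String := ["Hello,", "world"]

def Spec_fix_bad_indent (data_in : List String) (out : List String) : Prop :=
  out = fix_bad_indent_alt data_in
instance (data_in : List String) (out : List String) : Decidable (Spec_fix_bad_indent data_in out) := by
  unfold Spec_fix_bad_indent; infer_instance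

-- ===== CLAIM (what is proved, stated in full; the proofs are below) =====
def Claim_equal_fix_bad_indent : Prop := ∀ (data_in : List String),
  Dom_fix_bad_indent data_in → Pre_fix_bad_indent data_in →
  Spec_fix_bad_indent data_in (fix_bad_indent data_in)

-- ===== LEMMAS AND PROOFS =====

-- proof-side reference function: the groups of a nonempty line list, defined by
-- structural recursion from the left; both ports are shown equal to it
def pvBuildGroups : List String → List String
  | [] => []
  | [x] => [x]
  | x :: y :: rest =>
      let gs := pvBuildGroups (y :: rest)
      if pvLastIsPa x || pvFirstIsLower y then
        (x ++ " " ++ gs.head?.getD "") :: gs.drop 1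
      else
        x :: gs

-- A's test on the grown accumulated string agrees with the test on the newly appended raw line
theorem lastIsPa_append (cur x : String) :
    pvLastIsPa (cur ++ " " ++ x) = pvLastIsPa x := by
  unfold pvLastIsPa
  rcases hx : x.toList.getLast? with _ | c
  · have hnil : x.toList = [] := List.getLast?_eq_none_iff.mp hx
    simp [String.toList_append, hnil, List.getLast?_append]
  · have hne : x.toList ≠ [] := by
      intro h; rw [h] at hx; simp at hx
    rw [String.toList_append, String.toList_append,
      List.getLast?_append_of_ne_nil (l₁ := cur.toList ++ " ".toList) hne, hx]

-- merging a prefix onto the first line merges it onto the first group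
theorem buildGroups_merge (xs : List String) (a x : String) :
    pvBuildGroups ((a ++ " " ++ x) :: xs) =
      (a ++ " " ++ ((pvBuildGroups (x :: xs)).head?.getD "")) ::
        (pvBuildGroups (x :: xs)).drop 1 := by
  cases xs with
  | nil => simp [pvBuildGroups]
  | cons y ys =>
      simp only [pvBuildGroups, lastIsPa_append]
      by_cases hc : (pvLastIsPa x || pvFirstIsLower y) = true
      · simp [hc, String.append_assoc]
      · simp [hc]

-- A's loop computes the groups of (cur :: rest), appended after done
theorem loopA_eq_buildGroups (rest : List String) : ∀ (cur : String) (done : List String),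
    fixBadIndentLoopA cur done rest = done ++ pvBuildGroups (cur :: rest) := by
  induction rest with
  | nil => intro cur done; simp [fixBadIndentLoopA, pvBuildGroups]
  | cons x xs ih =>
      intro cur done
      simp only [fixBadIndentLoopA, pvBuildGroups]
      by_cases hc : (pvLastIsPa cur || pvFirstIsLower x) = true
      · rw [if_pos hc, if_pos hc, ih, buildGroups_merge]
      · rw [if_neg hc, if_neg hc, ih, List.append_assoc, List.singleton_append]

-- B's reversed fold over adjacent pairs computes the groups of the whole list
theorem foldB_eq_buildGroups (temp : List String) (h : String) (t : List String)
    (htemp : temp = h :: t) :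
    ((temp.zip (temp.drop 1)).reverse).foldl fixBadIndentStepB
        [(temp.getLast?).getD ""] = pvBuildGroups temp := by
  subst htemp
  rw [List.foldl_reverse]
  induction t generalizing h with
  | nil => simp [pvBuildGroups]
  | cons y ys ih =>
      have hlast : ((h :: y :: ys).getLast?).getD "" = ((y :: ys).getLast?).getD "" := by
        simp [List.getLast?_cons_cons]
      simp only [List.drop_succ_cons, List.drop_zero, List.zip_cons_cons, List.foldr_cons,
        hlast] at *
      rw [ih y]
      simp [fixBadIndentStepB, pvBuildGroups]

-- A's filtering foldl builds the same list as B's filter-then-map comprehension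
theorem foldl_filter_map (f : String → String) (l : List String) : ∀ (acc : List String),
    l.foldl (fun acc x => if x ≠ "" then acc ++ [f x] else acc) acc =
      acc ++ (l.filter (fun x => x ≠ "")).map f := by
  induction l with
  | nil => intro acc; simp
  | cons a t ih =>
      intro acc
      by_cases ha : a = ""
      · subst ha
        simpa using ih acc
      · rw [List.foldl_cons, if_pos ha, ih, List.filter_cons_of_pos (by simpa using ha)]
        simp

-- ===== VERDICT (by name: the statement is the Claim_ definition above) =====
theorem fix_bad_indent_spec : Claim_equal_fix_bad_indent := by
  intro data_in _ _
  unfold Spec_fix_bad_indent fix_bad_indent fix_bad_indent_alt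
  rw [foldl_filter_map]
  simp only [List.nil_append]
  rcases htemp : (data_in.filter (fun x => x ≠ "")).map
      (fun x => PySem.Str.replace x "\n" " ") with _ | ⟨h, t⟩
  · rfl
  · rcases hl : (h :: t).getLast? with _ | l
    · simp at hl
    · have hb := foldB_eq_buildGroups (h :: t) h t rfl
      rw [hl] at hb
      simp only [Option.getD_some] at hb
      show fixBadIndentLoopA h [] t =
        List.foldl fixBadIndentStepB [l] (((h :: t).zip ((h :: t).drop 1)).reverse)
      rw [loopA_eq_buildGroups, List.nil_append, ← hb]
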